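-- pv_equiv track=rewrite | github.com/OscarAyalaa/Software-Python | codeSignal.py | invertCHaracter
-- ===== SOURCE A (Python) =====
-- def invertCHaracter(palabra):
--     quitar = "()"
--     res = ""
--
--     for x in range(len(quitar)):
--         palabra = palabra.replace(quitar[x], "")
--
--     for i in reversed(palabra):
--         res = res + i
--
--     return res
-- ===== SOURCE B (Python) =====
-- def invertCHaracter(palabra):
--     res = ""
--     for c in palabra:
--         if c not in "()":
--             res = c + res
--     return res
-- ===== Notes on version B (the rewrite author's own statement) =====
-- stated objective: simpler
-- what changed: B replaces A's multiple passes (one replace call per parenthesis character, then an append loop over the reversed string) with a single loop that skips parenthesis characters and prepends each kept character, building the reversed result directly.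
import Mathlib
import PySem

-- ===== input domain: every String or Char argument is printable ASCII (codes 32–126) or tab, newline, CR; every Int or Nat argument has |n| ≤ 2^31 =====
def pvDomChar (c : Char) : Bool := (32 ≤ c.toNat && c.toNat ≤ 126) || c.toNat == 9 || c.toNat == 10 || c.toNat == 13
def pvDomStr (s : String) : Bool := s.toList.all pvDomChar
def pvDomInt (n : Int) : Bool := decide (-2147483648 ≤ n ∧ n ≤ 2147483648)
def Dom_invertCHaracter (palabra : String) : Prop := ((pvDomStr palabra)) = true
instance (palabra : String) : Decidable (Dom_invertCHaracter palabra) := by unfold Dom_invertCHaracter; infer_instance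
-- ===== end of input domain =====

-- B fuses A's separate passes (strip parentheses, then reverse) into one prepend loop; objective: simpler single pass.

-- ===== PORT A =====
-- A: for x in range(len("()")): palabra = palabra.replace("()"[x], ""); then res built by appending reversed(palabra).
def invertCHaracter (palabra : String) : String :=
  String.mk
    ((((PySem.List.pyRange 0 (PySem.Str.len "()") 1).foldl
        (fun p x => match PySem.List.pyGet? "()".toList x with
          | some c => PySem.Str.replace p (String.mk [c]) ""
          | none => p) palabra).toList.reverse).foldl
      (fun res i => res ++ [i]) ([] : List Char))

-- ===== PORT B =====
-- B: one loop; skip '(' and ')', prepend every other character.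
def invertCHaracter_alt (palabra : String) : String :=
  String.mk (palabra.toList.foldl
    (fun res c => if c = '(' ∨ c = ')' then res else c :: res) ([] : List Char))

-- ===== PRECONDITION & SPEC =====
def Spec_invertCHaracter (palabra : String) (out : String) : Prop := out = invertCHaracter_alt palabra
instance (palabra : String) (out : String) : Decidable (Spec_invertCHaracter palabra out) := by unfold Spec_invertCHaracter; infer_instance

-- ===== CLAIM (what is proved, stated in full; the proofs are below) =====
def Claim_equal_invertCHaracter : Prop := ∀ (palabra : String), Dom_invertCHaracter palabra → Spec_invertCHaracter palabra (invertCHaracter palabra)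

-- ===== LEMMAS AND PROOFS =====

-- replace(s, c, "") with a single-character pattern is filtering c out
theorem go_filter (c' : Char) : ∀ (fuel : Nat) (l acc : List Char), l.length ≤ fuel →
    PySem.Chars.replace.go [c'] [] fuel l acc = acc.reverse ++ l.filter (· ≠ c') := by
  intro fuel
  induction fuel with
  | zero => intro l acc h; rw [List.length_eq_zero_iff.mp (Nat.le_zero.mp h)]; simp [PySem.Chars.replace.go]
  | succ n ih =>
    intro l acc h
    cases l with
    | nil => simp [PySem.Chars.replace.go]
    | cons c t =>
      simp only [PySem.Chars.replace.go]
      by_cases hc : c = c'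
      · subst hc
        simp only [List.isPrefixOf, BEq.rfl, Bool.true_and, if_true]
        rw [ih _ _ (by simpa using Nat.le_of_succ_le_succ h)]
        simp [List.filter]
      · have hpre : [c'].isPrefixOf (c :: t) = false := by
          have hcc : ¬ c' = c := fun h' => hc h'.symm
          simp [List.isPrefixOf, hcc]
        rw [hpre]
        simp only [Bool.false_eq_true, if_false]
        rw [ih _ _ (by simpa using Nat.le_of_succ_le_succ h)]
        simp [List.filter, hc]

theorem replace_filter (c' : Char) (l : List Char) :
    PySem.Chars.replace l [c'] [] = l.filter (· ≠ c') := by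
  rw [PySem.Chars.replace]
  simp [go_filter c' l.length l [] (le_refl _)]

-- B's prepend loop builds the reverse of the filtered list
theorem prepend_loop (l acc : List Char) :
    l.foldl (fun res c => if c = '(' ∨ c = ')' then res else c :: res) acc
      = (l.filter (fun c => decide ¬(c = '(' ∨ c = ')'))).reverse ++ acc := by
  induction l generalizing acc with
  | nil => simp
  | cons c t ih =>
    by_cases hc : c = '(' ∨ c = ')' <;> simp [List.filter, hc, ih]

-- ===== VERDICT (by name: the statement is the Claim_ definition above) =====
theorem invertCHaracter_spec : Claim_equal_invertCHaracter := by
  intro palabra _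
  show invertCHaracter palabra = invertCHaracter_alt palabra
  unfold invertCHaracter invertCHaracter_alt
  have hr : PySem.List.pyRange 0 (PySem.Str.len "()") 1 = [0, 1] := by decide
  rw [hr]
  simp only [List.foldl]
  have h0 : PySem.List.pyGet? "()".toList 0 = some '(' := by decide
  have h1 : PySem.List.pyGet? "()".toList 1 = some ')' := by decide
  rw [h0, h1]
  rw [PySem.List.foldl_append_singleton_eq_self]
  rw [prepend_loop]
  rw [List.append_nil]
  apply congrArg
  simp only [List.nil_append]
  rw [List.reverse_inj]
  rw [PySem.Str.toList_replace, PySem.Str.toList_replace]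
  have e1 : (String.mk ['(']).toList = ['('] := rfl
  have e2 : (String.mk [')']).toList = [')'] := rfl
  have e3 : ("" : String).toList = [] := rfl
  rw [e1, e2, e3, replace_filter, replace_filter]
  rw [List.filter_filter]
  apply List.filter_congr
  intro c _
  by_cases h1 : c = '(' <;> by_cases h2 : c = ')' <;> simp [h1, h2]
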